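-- pv_equiv track=rewrite | github.com/GPCDA/Judeasy | core/FilesFunctions.py | fimDaBase
-- ===== SOURCE A (Python) =====
-- def fimDaBase(arquivos):
--     nomes = ''
--     periodos = []
--     fim = '00000000'
--     coluna = "fim"
--     #Pegando os nomes inteiros dos arquivos
--     for arquivo in arquivos:
--         nomes += arquivo
--     # Dividindo os nomes por "_"
--     nomes = nomes.split("_")
--     # Pegando apenas as datas dos nomes
--     for nome in nomes:
--         if nome.isdigit():
--             periodos.append(nome)
--     # Determinando o fim da base
--     for periodo in periodos:
--         if(len(periodo) > 2):
--             if int(periodo[4:8]) > int(fim[4:8]):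
--                 fim = periodo
--             elif int(periodo[4:8]) == int(fim[4:8]) and int(periodo[2:4]) > int(fim[2:4]):
--                 fim = periodo
--             elif int(periodo[4:8]) == int(fim[4:8]) and int(periodo[2:4]) == int(fim[2:4]) and int(periodo[0:2]) > int(fim[0:2]):
--                 fim = periodo
--     fim = fim[0:2] + '/' + fim[2:4] + '/' + fim[4:8]
--     registro = fim
--
--     # Retornando a coluna e o registro para colocar nas suas respectivas listas
--     return coluna, registro
-- ===== SOURCE B (Python) =====
-- def fimDaBase(arquivos):
--     chave = lambda t: (int(t[4:8]), int(t[2:4]), int(t[0:2]))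
--     datas = ['00000000'] + [t for t in "".join(arquivos).split("_") if t.isdigit() and len(t) > 2]
--     fim = sorted(datas, key=chave, reverse=True)[0]
--     return 'fim', fim[0:2] + '/' + fim[2:4] + '/' + fim[4:8]
-- ===== Notes on version B (the rewrite author's own statement) =====
-- stated objective: alternative
-- what changed: Replaces A's single-pass running-best loop with its three-branch elif comparison chain by a stable descending sort of the candidate tokens under the (year, month, day) key tuple, taking the first element of the sorted list.
import Mathlib
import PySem

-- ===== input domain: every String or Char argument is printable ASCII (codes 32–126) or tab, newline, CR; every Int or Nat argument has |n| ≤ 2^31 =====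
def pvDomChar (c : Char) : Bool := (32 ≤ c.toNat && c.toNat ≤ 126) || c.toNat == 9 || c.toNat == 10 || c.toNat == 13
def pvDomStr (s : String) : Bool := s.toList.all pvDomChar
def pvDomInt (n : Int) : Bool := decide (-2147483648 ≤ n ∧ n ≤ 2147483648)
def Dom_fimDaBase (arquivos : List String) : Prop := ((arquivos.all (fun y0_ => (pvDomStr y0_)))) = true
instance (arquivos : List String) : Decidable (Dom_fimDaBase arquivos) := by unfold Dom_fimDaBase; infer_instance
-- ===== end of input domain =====

-- B replaces A's single-pass running best with a three-branch elif chain by sorting the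
-- candidate tokens in descending (year, month, day) order and taking the first; objective: alternative.


-- ===== PORT A =====
-- int(t[a:b]) of A, totalised with getD 0; Pre_ excludes the inputs where Python raises ValueError
def pvSliceIntA (t : List Char) (a b : Int) : Int :=
  (PySem.Int.ofChars? (PySem.Chars.slice t (some a) (some b))).getD 0

def fimDaBase (arquivos : List String) : String × String :=
  let nomes := arquivos.foldl (fun acc arquivo => acc ++ arquivo.toList) ([] : List Char)
  let nomesL := PySem.Chars.splitOn nomes ['_']
  let periodos := nomesL.foldl (fun ps nome => if PySem.Chars.strIsdigit nome then ps ++ [nome] else ps) []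
  let fim := periodos.foldl (fun fim periodo =>
      if periodo.length > 2 then
        if pvSliceIntA periodo 4 8 > pvSliceIntA fim 4 8 then periodo
        else if pvSliceIntA periodo 4 8 = pvSliceIntA fim 4 8 ∧ pvSliceIntA periodo 2 4 > pvSliceIntA fim 2 4 then periodo
        else if pvSliceIntA periodo 4 8 = pvSliceIntA fim 4 8 ∧ pvSliceIntA periodo 2 4 = pvSliceIntA fim 2 4 ∧ pvSliceIntA periodo 0 2 > pvSliceIntA fim 0 2 then periodo
        else fim
      else fim)
    ['0','0','0','0','0','0','0','0']
  ("fim", String.ofList (PySem.Chars.slice fim (some 0) (some 2) ++ ['/'] ++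
                     PySem.Chars.slice fim (some 2) (some 4) ++ ['/'] ++
                     PySem.Chars.slice fim (some 4) (some 8)))

-- ===== PORT B =====
-- the tuple key (int(t[4:8]), int(t[2:4]), int(t[0:2])), ordered lexicographically as in Python
def pvKeyB (t : List Char) : Lex (Int × Lex (Int × Int)) :=
  toLex ((PySem.Int.ofChars? (PySem.Chars.slice t (some 4) (some 8))).getD 0,
    toLex ((PySem.Int.ofChars? (PySem.Chars.slice t (some 2) (some 4))).getD 0,
           (PySem.Int.ofChars? (PySem.Chars.slice t (some 0) (some 2))).getD 0))

def fimDaBase_alt (arquivos : List String) : String × String :=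
  let datas := ['0','0','0','0','0','0','0','0'] ::
    (PySem.Chars.splitOn (PySem.Chars.join [] (arquivos.map String.toList)) ['_']).filter
      (fun t => PySem.Chars.strIsdigit t && decide (t.length > 2))
  let fim := (PySem.List.pyGet? (PySem.List.sorted datas pvKeyB true) 0).getD []
  ("fim", String.ofList (PySem.Chars.slice fim (some 0) (some 2) ++ ['/'] ++
                     PySem.Chars.slice fim (some 2) (some 4) ++ ['/'] ++
                     PySem.Chars.slice fim (some 4) (some 8)))

-- ===== PRECONDITION & SPEC =====
-- Pre_ excludes exactly the inputs on which Python A raises ValueError (int('') on the empty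
-- slice t[4:8] of a purely numeric '_'-token of length 3 or 4); B raises the same ValueError there.
def Pre_fimDaBase (arquivos : List String) : Prop :=
  ∀ t ∈ PySem.Chars.splitOn (PySem.Chars.join [] (arquivos.map String.toList)) ['_'],
    PySem.Chars.strIsdigit t = true → t.length ≠ 3 ∧ t.length ≠ 4
instance (arquivos : List String) : Decidable (Pre_fimDaBase arquivos) := by
  unfold Pre_fimDaBase; infer_instance

def pvWitness_fimDaBase : List String := ["01022023_02032024", "05062024"]

def Spec_fimDaBase (arquivos : List String) (out : String × String) : Prop := out = fimDaBase_alt arquivos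
instance (arquivos : List String) (out : String × String) : Decidable (Spec_fimDaBase arquivos out) := by unfold Spec_fimDaBase; infer_instance

-- ===== CLAIM (what is proved, stated in full; the proofs are below) =====
def Claim_equal_fimDaBase : Prop := ∀ (arquivos : List String), Dom_fimDaBase arquivos → Pre_fimDaBase arquivos → Spec_fimDaBase arquivos (fimDaBase arquivos)

-- ===== LEMMAS AND PROOFS =====

-- A's '+=' concatenation loop equals B's ''.join
theorem pvCat_eq (l : List String) (acc : List Char) :
    l.foldl (fun acc arquivo => acc ++ arquivo.toList) acc
      = acc ++ PySem.Chars.join [] (l.map String.toList) := by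
  induction l generalizing acc with
  | nil => simp [PySem.Chars.join, List.intercalate]
  | cons s t ih =>
      simp only [List.foldl_cons, ih, List.map_cons, PySem.Chars.join, List.intercalate] at *
      induction (t.map String.toList) with
      | nil => simp
      | cons u v _ => simp [List.intersperse]

-- A's if-chain on one token is exactly 'strictly larger lexicographic key replaces the best'
theorem pvStep_eq (f p : List Char) :
    (if pvSliceIntA p 4 8 > pvSliceIntA f 4 8 then p
     else if pvSliceIntA p 4 8 = pvSliceIntA f 4 8 ∧ pvSliceIntA p 2 4 > pvSliceIntA f 2 4 then p
     else if pvSliceIntA p 4 8 = pvSliceIntA f 4 8 ∧ pvSliceIntA p 2 4 = pvSliceIntA f 2 4 ∧ pvSliceIntA p 0 2 > pvSliceIntA f 0 2 then p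
     else f)
    = if pvKeyB f < pvKeyB p then p else f := by
  simp only [pvSliceIntA, pvKeyB, Prod.Lex.lt_iff, ofLex_toLex]
  split_ifs <;> first | rfl | omega

-- a fold whose step skips tokens of length ≤ 2 is the plain fold over the filtered list
theorem pvFoldl_guard (step : List Char → List Char → List Char) (l : List (List Char)) (s : List Char) :
    l.foldl (fun f x => if x.length > 2 then step f x else f) s
      = (l.filter (fun x => decide (x.length > 2))).foldl step s := by
  induction l generalizing s with
  | nil => rfl
  | cons x t ih => by_cases h : x.length > 2 <;> simp [h, ih]

-- the head of insertBy is the old head unless the new element sorts before it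
theorem pvHead_insertBy {α : Type} (bef : α → α → Bool) (x : α) (acc : List α) :
    (PySem.List.insertBy bef x acc).head? =
      some (match acc.head? with | none => x | some y => if bef x y then x else y) := by
  cases acc with
  | nil => simp [PySem.List.insertBy]
  | cons y ys => by_cases h : bef x y <;> simp [PySem.List.insertBy, h]

-- the head of the insertion-sort fold is the running extremum under 'bef'
theorem pvHead_foldl_insertBy {α : Type} (bef : α → α → Bool) (d : α) :
    ∀ (l : List α) (acc : List α) (m : α), acc.head? = some m →
    ((l.foldl (fun acc x => PySem.List.insertBy bef x acc) acc).head?).getD d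
      = l.foldl (fun f x => if bef x f then x else f) m := by
  intro l
  induction l with
  | nil => intro acc m h; simp [h]
  | cons x t ih =>
      intro acc m h
      simp only [List.foldl_cons]
      refine ih _ _ ?_
      rw [pvHead_insertBy, h]

-- the first element of the reverse-sorted list is A's running best (first maximal element)
theorem pvSortedRev_head {α κ : Type} [LinearOrder κ] (key : α → κ) (m : α) (l : List α) (d : α) :
    ((PySem.List.sorted (m :: l) key true).head?).getD d
      = l.foldl (fun f x => if key f < key x then x else f) m := by
  rw [PySem.List.sorted_rev_eq_foldl_insertBy, List.foldl_cons]
  have h := pvHead_foldl_insertBy (fun a b => decide (key b < key a)) d l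
      (PySem.List.insertBy (fun a b => decide (key b < key a)) m []) m (by simp [PySem.List.insertBy])
  simpa using h

-- ===== VERDICT (by name: the statement is the Claim_ definition above) =====
theorem fimDaBase_spec : Claim_equal_fimDaBase := by
  intro arquivos _ _
  unfold Spec_fimDaBase fimDaBase fimDaBase_alt
  simp only [pvCat_eq, List.nil_append, PySem.List.foldl_append_if, List.nil_append]
  rw [List.map_id']
  simp only [pvStep_eq, pvFoldl_guard, List.filter_filter, Bool.and_comm]
  rw [PySem.List.pyGet?_zero, ← List.head?_eq_getElem?, pvSortedRev_head]
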